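-- pv_equiv track=rewrite | github.com/LeonVillanueva/MOOCs | Coursera/Natural Language Processing with Probabilistic Model/1_autocorrect.py | delete_letter
-- ===== SOURCE A (Python) =====
-- def delete_letter(word):
--     delete_l = []
--     split_l = []
--
--     for char in range(len(word)):
--         L = ''.join(word[0:char])
--         R = ''.join(word[char:])
--         split_l.append ((L, R))
--     for char in range(len(word)):
--         chars = [c for c in word]
--         chars.pop (char)
--         delete_l.append (''.join(chars))
--
--     return delete_l
-- ===== SOURCE B (Python) =====
-- def delete_letter(word):
--     split_l = []
--     for i in range(len(word)):
--         split_l.append((word[:i], word[i:]))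
--     return [L + R[1:] for (L, R) in split_l]
-- ===== Notes on version B (the rewrite author's own statement) =====
-- stated objective: simpler
-- what changed: B materialises a split table of (prefix, suffix) pairs in one pass and then maps L + R[1:] over it, instead of rebuilding a fresh char list and popping the i-th element for every index.
import Mathlib
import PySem

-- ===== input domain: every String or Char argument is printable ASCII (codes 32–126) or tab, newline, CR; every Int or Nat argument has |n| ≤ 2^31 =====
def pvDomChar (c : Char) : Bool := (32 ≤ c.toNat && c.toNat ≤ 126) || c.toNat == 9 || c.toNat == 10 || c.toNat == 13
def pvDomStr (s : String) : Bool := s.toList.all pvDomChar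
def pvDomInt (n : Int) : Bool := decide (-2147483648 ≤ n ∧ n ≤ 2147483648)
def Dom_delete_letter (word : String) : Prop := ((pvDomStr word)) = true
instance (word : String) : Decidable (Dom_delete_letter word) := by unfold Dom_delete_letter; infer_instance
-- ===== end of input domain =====

-- B builds a split table of (L, R) pairs once and then emits L + R[1:] from it, instead of re-popping a fresh char list per index; objective: simpler decomposition, same cost.

-- ===== PORT A =====
def delete_letter (word : String) : List String :=
  let cs := word.toList
  let _split_l := (PySem.List.pyRange 0 cs.length 1).foldl (fun acc i =>
      let L := String.mk (PySem.List.slice cs (some 0) (some i))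
      let R := String.mk (PySem.List.slice cs (some i) none)
      acc ++ [(L, R)]) ([] : List (String × String))
  let delete_l := (PySem.List.pyRange 0 cs.length 1).foldl (fun acc i =>
      let chars := cs
      match PySem.List.pop? chars i with
      | some (_, rest) => acc ++ [String.mk rest]
      | none => acc) ([] : List String)
  delete_l

-- ===== PORT B =====
def delete_letter_alt (word : String) : List String :=
  let cs := word.toList
  let split_l := (PySem.List.pyRange 0 cs.length 1).foldl (fun acc i =>
      acc ++ [(PySem.List.slice cs none (some i), PySem.List.slice cs (some i) none)]) ([] : List (List Char × List Char))
  split_l.map (fun p => String.mk (p.1 ++ PySem.List.slice p.2 (some 1) none))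

-- ===== PRECONDITION & SPEC =====
def Spec_delete_letter (word : String) (out : List String) : Prop := out = delete_letter_alt word
instance (word : String) (out : List String) : Decidable (Spec_delete_letter word out) := by unfold Spec_delete_letter; infer_instance

-- ===== CLAIM (what is proved, stated in full; the proofs are below) =====
def Claim_equal_delete_letter : Prop := ∀ (word : String), Dom_delete_letter word → Spec_delete_letter word (delete_letter word)

-- ===== LEMMAS AND PROOFS =====

theorem delete_eq (cs : List Char) (i : Nat) :
    cs.eraseIdx i = cs.take i ++ (cs.drop i).tail := by
  rw [List.eraseIdx_eq_take_drop_succ, List.tail_drop]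

-- ===== VERDICT (by name: the statement is the Claim_ definition above) =====
theorem delete_letter_spec : Claim_equal_delete_letter := by
  intro word _
  unfold Spec_delete_letter delete_letter delete_letter_alt
  set cs := word.toList with hcs
  simp only [PySem.List.pyRange_zero_nat, List.foldl_map]
  have hfun : ∀ (acc : List String) (i : Nat), i ∈ List.range cs.length →
      (match PySem.List.pop? cs (i : Int) with
       | some (_, rest) => acc ++ [String.mk rest]
       | none => acc) = acc ++ [String.mk (cs.eraseIdx i)] := by
    intro acc i hi
    simp only [List.mem_range] at hi
    rw [PySem.List.pop?_natCast cs i hi]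
  rw [PySem.List.foldl_congr_mem _ _ (fun acc i => acc ++ [String.mk (cs.eraseIdx i)]) _ hfun]
  rw [PySem.List.foldl_append_singleton_eq_map, PySem.List.foldl_append_singleton_eq_map]
  simp only [List.nil_append, List.map_map]
  apply List.map_congr_left
  intro i hi
  simp only [List.mem_range] at hi
  simp [PySem.List.slice_from, PySem.List.slice_to, delete_eq cs i, Function.comp]
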